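-- pv_equiv track=rewrite | github.com/mufeed533/Algo-and-ds | recursion/delete_kth_element_from_stack_top.py | solve
-- ===== SOURCE A (Python) =====
-- def solve(sta: list, k: int) -> list:
--     if k == 1:
--         sta.pop()
--         return sta
--     temp = sta.pop()
--     sta = solve(sta, k - 1)
--     sta.append(temp)
--     return sta
-- ===== SOURCE B (Python) =====
-- def solve(sta: list, k: int) -> list:
--     temp = []
--     while k != 1:
--         temp.append(sta.pop())
--         k -= 1
--     sta.pop()
--     while temp:
--         sta.append(temp.pop())
--     return sta
-- ===== Notes on version B (the rewrite author's own statement) =====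
-- stated objective: alternative
-- what changed: Replaced the recursion (pop, recurse with k-1, append on return) by an explicit iterative loop that saves popped elements in a local temp list and pushes them back after discarding the k-th element.
import Mathlib
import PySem

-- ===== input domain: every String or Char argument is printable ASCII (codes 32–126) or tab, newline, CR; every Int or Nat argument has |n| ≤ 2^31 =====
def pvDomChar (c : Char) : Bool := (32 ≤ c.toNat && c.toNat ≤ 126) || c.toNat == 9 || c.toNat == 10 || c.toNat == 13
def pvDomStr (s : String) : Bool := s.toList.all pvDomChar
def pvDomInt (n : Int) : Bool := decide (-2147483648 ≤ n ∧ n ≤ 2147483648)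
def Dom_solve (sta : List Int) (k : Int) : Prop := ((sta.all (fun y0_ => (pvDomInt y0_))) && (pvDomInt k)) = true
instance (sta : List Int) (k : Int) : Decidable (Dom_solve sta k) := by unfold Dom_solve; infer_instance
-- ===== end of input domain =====

-- B replaces A's recursion by an explicit iterative pop/save/re-push loop with a temp stack (alternative decomposition; return value, and both mutate sta in place identically).


-- ===== PORT A =====
-- A recursion: if k == 1, pop the top; else pop, recurse with k-1, push back.
-- When sta is empty and k ≠ 1 Python's sta.pop() raises IndexError: excluded by Pre_solve (the [] branch is a totality guard only).
def solve (sta : List Int) (k : Int) : List Int :=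
  if k = 1 then sta.dropLast
  else if hne : sta = [] then []  -- Python raises IndexError here (outside Pre_solve)
  else solve sta.dropLast (k - 1) ++ [sta.getLast hne]
termination_by sta.length
decreasing_by
  have := List.length_pos_iff.mpr hne
  simp [List.length_dropLast]; omega

-- ===== PORT B =====
-- B loop: while k != 1, pop into temp; guard [] = where Python's sta.pop() raises (outside Pre_solve).
def solveAltGo (sta : List Int) (k : Int) (temp : List Int) : List Int × List Int :=
  if k = 1 then (sta, temp)
  else if hne : sta = [] then (sta, temp)  -- Python raises IndexError here (outside Pre_solve)
  else solveAltGo sta.dropLast (k - 1) (temp ++ [sta.getLast hne])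
termination_by sta.length
decreasing_by
  have := List.length_pos_iff.mpr hne
  simp [List.length_dropLast]; omega

def solve_alt (sta : List Int) (k : Int) : List Int :=
  let st := solveAltGo sta k []
  -- sta.pop() discarding the k-th element, then push temp back in reverse pop order
  st.1.dropLast ++ st.2.reverse

-- ===== PRECONDITION & SPEC =====
-- Pre_solve: exactly the inputs where Python A returns (otherwise a pop on an empty list raises IndexError).
def Pre_solve (sta : List Int) (k : Int) : Prop := 1 ≤ k ∧ k ≤ sta.length
instance (sta : List Int) (k : Int) : Decidable (Pre_solve sta k) := by unfold Pre_solve; infer_instance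
def pvWitness_solve : List Int × Int := ([1, 2, 3], 2)

def Spec_solve (sta : List Int) (k : Int) (out : List Int) : Prop := out = solve_alt sta k
instance (sta : List Int) (k : Int) (out : List Int) : Decidable (Spec_solve sta k out) := by unfold Spec_solve; infer_instance

-- ===== CLAIM (what is proved, stated in full; the proofs are below) =====
def Claim_equal_solve : Prop := ∀ (sta : List Int) (k : Int), Dom_solve sta k → Pre_solve sta k → Spec_solve sta k (solve sta k)

-- ===== LEMMAS AND PROOFS =====

-- Loop invariant: under Pre_, the iterative loop's final state yields A's result followed by the saved temp, reversed.
theorem solveAltGo_spec (n : ℕ) : ∀ (sta : List Int) (k : Int) (temp : List Int),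
    sta.length = n → 1 ≤ k → k ≤ sta.length →
    (solveAltGo sta k temp).1.dropLast ++ (solveAltGo sta k temp).2.reverse
      = solve sta k ++ temp.reverse := by
  induction n with
  | zero =>
    intro sta k temp hn h1 h2
    simp at hn
    subst hn; simp at h2; omega
  | succ m ih =>
    intro sta k temp hn h1 h2
    by_cases hk : k = 1
    · subst hk
      rw [solveAltGo, solve]
      simp
    · have hne : sta ≠ [] := by
        intro h; subst h; simp at hn
      rw [solveAltGo, solve]
      simp [hk, hne]
      have hlen : sta.dropLast.length = m := by
        simp [List.length_dropLast]; omega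
      have hk2 : k - 1 ≤ (sta.dropLast.length : Int) := by
        rw [hlen]; omega
      rw [ih sta.dropLast (k - 1) (temp ++ [sta.getLast hne]) hlen (by omega) hk2]
      simp

-- ===== VERDICT (by name: the statement is the Claim_ definition above) =====
theorem solve_spec : Claim_equal_solve := by
  intro sta k _ hpre
  unfold Spec_solve solve_alt
  have := solveAltGo_spec sta.length sta k [] rfl hpre.1 hpre.2
  simp at this
  simp [this]
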